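-- pv_equiv track=rewrite | github.com/pypi-data/pypi-mirror-81 | packages/bitmask-decoder/bitmask-decoder-0.0.4.tar.gz/bitmask-decoder-0.0.4/bitmask_decoder/bitmask_decoder.py | find_dow
-- ===== SOURCE A (Python) =====
-- from itertools import combinations
--
-- def find_dow(dow):
--     lis = [1, 2, 4, 8, 16, 32, 64]
--     for n in range(1, len(lis)+1):
--         for comb in combinations(lis, n):
--             try:
--                 if sum(comb) == int(dow):
--                     return comb
--             except:
--                 return None
-- ===== SOURCE B (Python) =====
-- def find_dow(dow):
--     try:
--         d = int(dow)
--     except Exception: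
--         return None
--     if d < 1 or d > 127:
--         return None
--     return tuple(v for v in (1, 2, 4, 8, 16, 32, 64) if d // v % 2)
-- ===== Notes on version B (the rewrite author's own statement) =====
-- stated objective: faster
-- what changed: Replaces the exhaustive enumeration of all subsets of the seven bit values by a direct range check followed by per-bit extraction (d // v % 2) of the unique matching subset, which is the binary decomposition of d.
import Mathlib
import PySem

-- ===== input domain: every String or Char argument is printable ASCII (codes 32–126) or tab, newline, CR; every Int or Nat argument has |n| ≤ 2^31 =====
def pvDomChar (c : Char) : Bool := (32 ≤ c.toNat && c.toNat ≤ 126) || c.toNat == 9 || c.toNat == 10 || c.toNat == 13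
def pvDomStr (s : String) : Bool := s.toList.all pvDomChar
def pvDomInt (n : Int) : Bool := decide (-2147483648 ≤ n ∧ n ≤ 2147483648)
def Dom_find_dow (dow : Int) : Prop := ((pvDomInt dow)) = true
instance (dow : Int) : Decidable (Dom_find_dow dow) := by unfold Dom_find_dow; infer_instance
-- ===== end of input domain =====

-- B replaces A's exhaustive enumeration of all subsets of the bit values by a
-- direct range check and per-bit extraction of the unique subset (faster by a constant factor).


-- ===== PORT A =====
-- itertools.combinations(l, n) in Python's emission order:
-- combinations containing the head come first, each in ascending (input) order.
def pyCombinations (l : List Int) (n : Nat) : List (List Int) :=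
  match n, l with
  | 0, _ => [[]]
  | _ + 1, [] => []
  | n + 1, x :: xs => (pyCombinations xs n).map (fun c => x :: c) ++ pyCombinations xs (n + 1)

-- loop counters n of 'range(1, len(lis)+1)' as Nats (pyRange yields Ints)
def rangeToNatList : List Int → List Nat
  | [] => []
  | x :: xs => x.toNat :: rangeToNatList xs

-- the outer 'for n in range(1, len(lis)+1)' loop with the early-returning inner loop;
-- the inner 'for comb in …: if sum(comb) == int(dow): return comb' is the first match, i.e. find?.
def findA (dow : Int) : List Nat → Option (List Int)
  | [] => none
  | n :: ns =>
    match (pyCombinations [1, 2, 4, 8, 16, 32, 64] n).find? (fun c => c.sum == dow) with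
    | some c => some c
    | none => findA dow ns

-- int(dow) on an int argument is the identity and never raises, so the try/except is vacuous here.
def find_dow (dow : Int) : Option (List Int) :=
  findA dow (rangeToNatList (PySem.List.pyRange 1 8 1))

-- ===== PORT B =====
def find_dow_alt (dow : Int) : Option (List Int) :=
  if dow < 1 ∨ dow > 127 then none
  else some ([1, 2, 4, 8, 16, 32, 64].filter
    (fun v => PySem.Int.mod (PySem.Int.floordiv dow v) 2 ≠ 0))

-- ===== PRECONDITION & SPEC =====
def Spec_find_dow (dow : Int) (out : Option (List Int)) : Prop := out = find_dow_alt dow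
instance (dow : Int) (out : Option (List Int)) : Decidable (Spec_find_dow dow out) := by unfold Spec_find_dow; infer_instance

-- ===== CLAIM (what is proved, stated in full; the proofs are below) =====
def Claim_equal_find_dow : Prop := ∀ (dow : Int), Dom_find_dow dow → Spec_find_dow dow (find_dow dow)

-- ===== LEMMAS AND PROOFS =====

-- every combination A ever sums has sum between 1 and 127 (a closed fact about the literal list)
theorem sums_bounded :
    ((List.range' 1 7).all fun n =>
      (pyCombinations [1, 2, 4, 8, 16, 32, 64] n).all fun c =>
        decide (1 ≤ c.sum ∧ c.sum ≤ 127)) = true := by decide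

theorem findA_none (dow : Int) (ns : List Nat)
    (h : ∀ n ∈ ns, ∀ c ∈ pyCombinations [1, 2, 4, 8, 16, 32, 64] n, c.sum ≠ dow) :
    findA dow ns = none := by
  induction ns with
  | nil => rfl
  | cons n ns ih =>
    have hfind : (pyCombinations [1, 2, 4, 8, 16, 32, 64] n).find?
        (fun c => c.sum == dow) = none := by
      apply List.find?_eq_none.mpr
      intro c hc
      simp [h n (by simp) c hc]
    simp [findA, hfind]
    exact ih (fun n hn c hc => h n (by simp [hn]) c hc)

theorem range_lits : rangeToNatList (PySem.List.pyRange 1 8 1) = List.range' 1 7 := by decide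

theorem out_range_none (dow : Int) (h : dow < 1 ∨ 127 < dow) : find_dow dow = none := by
  unfold find_dow
  rw [range_lits]
  apply findA_none
  intro n hn c hc
  have hall := sums_bounded
  rw [List.all_eq_true] at hall
  have hc' := hall n hn
  rw [List.all_eq_true] at hc'
  have := of_decide_eq_true (hc' c hc)
  omega

theorem in_range_eq : ∀ k : Nat, k < 127 →
    find_dow ((k : Int) + 1) = find_dow_alt ((k : Int) + 1) := by decide

theorem find_dow_eq (dow : Int) : find_dow dow = find_dow_alt dow := by
  by_cases hio : 1 ≤ dow ∧ dow ≤ 127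
  · have hk : (((dow - 1).toNat : Int)) + 1 = dow := by omega
    have hklt : (dow - 1).toNat < 127 := by omega
    have := in_range_eq (dow - 1).toNat hklt
    rwa [hk] at this
  · have h : dow < 1 ∨ 127 < dow := by omega
    rw [out_range_none dow h]
    unfold find_dow_alt
    rw [if_pos (by omega)]

-- ===== VERDICT (by name: the statement is the Claim_ definition above) =====
theorem find_dow_spec : Claim_equal_find_dow := by
  intro dow _
  unfold Spec_find_dow
  exact find_dow_eq dow
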